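-- pv_equiv track=rewrite | github.com/karlthomas3/cs50p | Week5/test_plates/plates.py | no_mid_num
-- ===== SOURCE A (Python) =====
-- def no_mid_num(t):
--     num = False
--     # iterate text
--     for i in t:
--         # first num cant be 0
--         if i == "0" and num == False:
--             return False
--         # flag when num found
--         if i.isnumeric():
--             num = True
--         # if alpha found after num flagged, return false
--         if i.isalpha() and num == True:
--             return False
--     return True
-- ===== SOURCE B (Python) =====
-- def no_mid_num(t):
--     i = next((i for i, c in enumerate(t) if c.isnumeric()), None)
--     if i is None:
--         return True
--     if t[i] == "0":
--         return False
--     return not any(c.isalpha() for c in t[i + 1:])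
-- ===== Notes on version B (the rewrite author's own statement) =====
-- stated objective: simpler
-- what changed: Replaces A's single pass with an accumulating flag and three in-loop checks by a direct decomposition: locate the first numeric character, reject if it is the zero digit, otherwise reject iff any later character is alphabetic.
import Mathlib
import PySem

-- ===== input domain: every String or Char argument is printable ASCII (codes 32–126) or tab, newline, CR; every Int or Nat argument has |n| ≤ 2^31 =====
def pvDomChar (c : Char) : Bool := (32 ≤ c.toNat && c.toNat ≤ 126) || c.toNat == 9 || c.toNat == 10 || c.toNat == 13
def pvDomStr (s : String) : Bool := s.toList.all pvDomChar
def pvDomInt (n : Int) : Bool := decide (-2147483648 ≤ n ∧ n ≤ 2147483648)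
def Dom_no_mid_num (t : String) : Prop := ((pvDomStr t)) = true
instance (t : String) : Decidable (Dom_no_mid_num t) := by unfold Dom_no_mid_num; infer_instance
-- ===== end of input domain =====

-- B replaces A's flag-accumulating single pass by a first-numeric-index + suffix-scan decomposition (simpler); return values proved equal on all inputs.


-- ===== PORT A =====
-- A's loop over the characters with the `num` flag; on the printable-ASCII domain
-- Python's str.isnumeric coincides with PySem.Chars.isdigit (exactly '0'..'9').
def noMidLoopA : List Char → Bool → Bool
  | [], _ => true
  | c :: rest, num =>
    if c = '0' && num == false then false
    else
      let num' := if PySem.Chars.isdigit c then true else num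
      if PySem.Chars.isalpha c && num' == true then false
      else noMidLoopA rest num'

def no_mid_num (t : String) : Bool := noMidLoopA t.toList false

-- ===== PORT B =====
-- Source B: i = first index with c.isnumeric() (next over enumerate = findIdx?);
-- None → True; t[i] == "0" → False; else not any(c.isalpha() for c in t[i+1:]).
def no_mid_num_alt (t : String) : Bool :=
  let cs := t.toList
  match cs.findIdx? PySem.Chars.isdigit with
  | none => true
  | some i =>
    if PySem.List.pyGet? cs (i : Int) = some '0' then false
    else !(PySem.List.slice cs (some ((i : Int) + 1)) none).any PySem.Chars.isalpha

-- ===== PRECONDITION & SPEC =====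
def Spec_no_mid_num (t : String) (out : Bool) : Prop := out = no_mid_num_alt t
instance (t : String) (out : Bool) : Decidable (Spec_no_mid_num t out) := by unfold Spec_no_mid_num; infer_instance

-- ===== CLAIM (what is proved, stated in full; the proofs are below) =====
def Claim_equal_no_mid_num : Prop := ∀ (t : String), Dom_no_mid_num t → Spec_no_mid_num t (no_mid_num t)

-- ===== LEMMAS AND PROOFS =====

-- a digit character is never alphabetic (the ranges are disjoint)
lemma digit_not_alpha (c : Char) (h : PySem.Chars.isdigit c = true) :
    PySem.Chars.isalpha c = false := by
  simp [PySem.Chars.isdigit, PySem.Chars.isalpha, PySem.Chars.isupper, PySem.Chars.islower,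
    Char.le_def, UInt32.le_iff_toNat_le] at *
  omega

-- once A's flag is set, the loop returns true iff no later character is alphabetic
lemma noMidLoopA_true (l : List Char) : noMidLoopA l true = !l.any PySem.Chars.isalpha := by
  induction l with
  | nil => simp [noMidLoopA]
  | cons c rest ih =>
    by_cases ha : PySem.Chars.isalpha c = true <;>
      simp [noMidLoopA, ha, ih]

-- the two algorithms agree on any character list
lemma noMidLoopA_eq (cs : List Char) :
    noMidLoopA cs false =
      (match cs.findIdx? PySem.Chars.isdigit with
       | none => true
       | some i =>
         if PySem.List.pyGet? cs (i : Int) = some '0' then false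
         else !(PySem.List.slice cs (some ((i : Int) + 1)) none).any PySem.Chars.isalpha) := by
  induction cs with
  | nil => simp [noMidLoopA]
  | cons c rest ih =>
    by_cases hd : PySem.Chars.isdigit c = true
    · -- head is the first numeric character: index 0
      have ha := digit_not_alpha c hd
      rw [List.findIdx?_cons, if_pos hd]
      show noMidLoopA (c :: rest) false =
        (if PySem.List.pyGet? (c :: rest) ((0 : Nat) : Int) = some '0' then false
         else !(PySem.List.slice (c :: rest) (some (((0 : Nat) : Int) + 1)) none).any
           PySem.Chars.isalpha)
      rw [PySem.List.pyGet?_natCast]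
      have hs : ((0 : Nat) : Int) + 1 = ((1 : Nat) : Int) := by norm_num
      rw [hs, PySem.List.slice_from_natCast]
      by_cases h0 : c = '0'
      · subst h0
        simp [noMidLoopA]
      · simp [noMidLoopA, hd, ha, h0, noMidLoopA_true]
    · -- head is not numeric: A keeps the flag false, B shifts the found index by one
      have h0 : c ≠ '0' := by
        intro h; subst h; simp [PySem.Chars.isdigit] at hd
      have hA : noMidLoopA (c :: rest) false = noMidLoopA rest false := by
        by_cases ha : PySem.Chars.isalpha c = true <;>
          simp [noMidLoopA, hd, h0, ha]
      rw [hA, ih, List.findIdx?_cons, if_neg (by simp [hd])]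
      cases hfi : rest.findIdx? PySem.Chars.isdigit with
      | none => simp
      | some i =>
        rw [Option.map_some]
        have hslice : PySem.List.slice (c :: rest) (some ((i : Int) + 1 + 1)) none =
            PySem.List.slice rest (some ((i : Int) + 1)) none := by
          have h1 : ((i : Int) + 1 + 1) = ((i + 2 : Nat) : Int) := by push_cast; ring
          have h2 : ((i : Int) + 1) = ((i + 1 : Nat) : Int) := by push_cast; ring
          rw [h1, h2, PySem.List.slice_from_natCast, PySem.List.slice_from_natCast]
          rfl
        simp [hslice]

-- ===== VERDICT (by name: the statement is the Claim_ definition above) =====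
theorem no_mid_num_spec : Claim_equal_no_mid_num := by
  intro t _
  show no_mid_num t = no_mid_num_alt t
  unfold no_mid_num no_mid_num_alt
  exact noMidLoopA_eq t.toList
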